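-- pv_equiv track=rewrite | github.com/gauravbondegit/NakshatraVed | backend/core/aspects.py | get_aspects_on_house
-- ===== SOURCE A (Python) =====
-- SPECIAL_ASPECTS = {
--     "Mars": [3, 6, 7],       # 4th, 7th, 8th
--     "Jupiter": [4, 6, 8],    # 5th, 7th, 9th
--     "Saturn": [2, 6, 9],     # 3rd, 7th, 10th
-- }
--
-- DEFAULT_ASPECTS = [6]  # 7th house aspect only
--
-- def get_aspected_houses(planet_name: str, planet_house: int) -> list[int]:
--     """Get list of houses (1-12) that a planet aspects from its position.
--
--     Args:
--         planet_name: Name of the planet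
--         planet_house: House number (1-12) where the planet is placed
--     """
--     offsets = SPECIAL_ASPECTS.get(planet_name, DEFAULT_ASPECTS)
--     aspected = []
--     for offset in offsets:
--         house = ((planet_house - 1 + offset) % 12) + 1
--         aspected.append(house)
--     return aspected
--
-- def get_aspects_on_house(house_number: int,
--                           planet_houses: dict[str, int]) -> list[str]:
--     """Get list of planets that aspect a given house."""
--     aspecting = []
--     for planet_name, planet_house in planet_houses.items():
--         aspected_houses = get_aspected_houses(planet_name, planet_house)
--         if house_number in aspected_houses:
--             aspecting.append(planet_name)
--     return aspecting
-- ===== SOURCE B (Python) =====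
-- SPECIAL_ASPECTS = {
--     "Mars": [3, 6, 7],
--     "Jupiter": [4, 6, 8],
--     "Saturn": [2, 6, 9],
-- }
--
-- DEFAULT_ASPECTS = [6]
--
-- def get_aspects_on_house(house_number: int,
--                           planet_houses: dict[str, int]) -> list[str]:
--     """Get list of planets that aspect a given house (houses are 1-12)."""
--     if not (1 <= house_number <= 12):
--         return []
--     return [name for name, house in planet_houses.items()
--             if (house_number - house) % 12 in SPECIAL_ASPECTS.get(name, DEFAULT_ASPECTS)]
-- ===== Notes on version B (the rewrite author's own statement) =====
-- stated objective: simpler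
-- what changed: B inverts the aspect relation: instead of enumerating each planet's aspected houses and testing membership, it computes the single offset (house_number - planet_house) % 12 per planet and tests it against the planet's aspect-offset list, guarded by the natural 1..12 house range; the get_aspected_houses helper and its inner loop disappear.
import Mathlib
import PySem

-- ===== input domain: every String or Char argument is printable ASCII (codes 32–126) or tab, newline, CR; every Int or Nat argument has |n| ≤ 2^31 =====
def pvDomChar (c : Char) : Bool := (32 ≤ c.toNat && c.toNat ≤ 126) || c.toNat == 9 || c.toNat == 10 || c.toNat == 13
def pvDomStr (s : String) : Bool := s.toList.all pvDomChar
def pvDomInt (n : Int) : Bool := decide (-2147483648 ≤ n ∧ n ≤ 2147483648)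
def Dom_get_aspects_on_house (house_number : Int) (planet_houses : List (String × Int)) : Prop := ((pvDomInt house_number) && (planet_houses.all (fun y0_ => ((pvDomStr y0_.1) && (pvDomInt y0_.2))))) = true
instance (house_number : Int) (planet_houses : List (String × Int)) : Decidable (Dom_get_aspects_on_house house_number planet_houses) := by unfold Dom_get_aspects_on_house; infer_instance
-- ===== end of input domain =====

-- B inverts the aspect relation: one offset (house_number - planet_house) % 12 per planet, tested
-- against that planet's aspect-offset list, instead of enumerating each planet's aspected houses.

-- ===== PORT A =====
-- module constants SPECIAL_ASPECTS / DEFAULT_ASPECTS (shared by both Pythons)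
def SPECIAL_ASPECTS : PySem.Dict String (List Int) :=
  PySem.Dict.mk [("Mars", [3, 6, 7]), ("Jupiter", [4, 6, 8]), ("Saturn", [2, 6, 9])]
def DEFAULT_ASPECTS : List Int := [6]

def get_aspected_houses (planet_name : String) (planet_house : Int) : List Int :=
  let offsets := PySem.Dict.getD SPECIAL_ASPECTS planet_name DEFAULT_ASPECTS
  offsets.foldl (fun aspected offset =>
    aspected ++ [PySem.Int.mod (planet_house - 1 + offset) 12 + 1]) []

def get_aspects_on_house (house_number : Int) (planet_houses : List (String × Int)) : List String :=
  planet_houses.foldl (fun aspecting p =>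
    if house_number ∈ get_aspected_houses p.1 p.2 then aspecting ++ [p.1] else aspecting) []

-- ===== PORT B =====
def get_aspects_on_house_alt (house_number : Int) (planet_houses : List (String × Int)) : List String :=
  if 1 ≤ house_number ∧ house_number ≤ 12 then
    (planet_houses.filter (fun p =>
      decide (PySem.Int.mod (house_number - p.2) 12 ∈ PySem.Dict.getD SPECIAL_ASPECTS p.1 DEFAULT_ASPECTS))).map Prod.fst
  else []

-- ===== PRECONDITION & SPEC =====
def Spec_get_aspects_on_house (house_number : Int) (planet_houses : List (String × Int)) (out : List String) : Prop := out = get_aspects_on_house_alt house_number planet_houses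
instance (house_number : Int) (planet_houses : List (String × Int)) (out : List String) : Decidable (Spec_get_aspects_on_house house_number planet_houses out) := by unfold Spec_get_aspects_on_house; infer_instance

-- ===== CLAIM (what is proved, stated in full; the proofs are below) =====
def Claim_equal_get_aspects_on_house : Prop := ∀ (house_number : Int) (planet_houses : List (String × Int)), Dom_get_aspects_on_house house_number planet_houses → Spec_get_aspects_on_house house_number planet_houses (get_aspects_on_house house_number planet_houses)

-- ===== LEMMAS AND PROOFS =====

theorem aspect_offset (hn h o : Int) (ho : 0 ≤ o) (ho' : o < 12) :
    (hn = PySem.Int.mod (h - 1 + o) 12 + 1) ↔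
      (1 ≤ hn ∧ hn ≤ 12) ∧ PySem.Int.mod (hn - h) 12 = o := by
  rw [PySem.Int.mod_eq_emod_of_pos (by norm_num), PySem.Int.mod_eq_emod_of_pos (by norm_num)]
  omega

theorem mem_map_offsets (hn h : Int) (offsets : List Int)
    (hall : ∀ o ∈ offsets, 0 ≤ o ∧ o < 12) :
    (hn ∈ offsets.map (fun o => PySem.Int.mod (h - 1 + o) 12 + 1)) ↔
      (1 ≤ hn ∧ hn ≤ 12) ∧ PySem.Int.mod (hn - h) 12 ∈ offsets := by
  induction offsets with
  | nil => simp
  | cons o os ih =>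
    have ho := hall o (by simp)
    have ih' := ih (fun x hx => hall x (by simp [hx]))
    simp only [List.map_cons, List.mem_cons, ih', aspect_offset hn h o ho.1 ho.2]
    tauto

theorem offsets_cases (n : String) :
    PySem.Dict.getD SPECIAL_ASPECTS n DEFAULT_ASPECTS =
      if n = "Mars" then [3, 6, 7] else if n = "Jupiter" then [4, 6, 8]
      else if n = "Saturn" then [2, 6, 9] else [6] := by
  by_cases h1 : n = "Mars"
  · subst h1; decide
  by_cases h2 : n = "Jupiter"
  · subst h2; decide
  by_cases h3 : n = "Saturn"
  · subst h3; decide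
  have e1 : ("Mars" == n) = false := beq_eq_false_iff_ne.mpr (fun e => h1 e.symm)
  have e2 : ("Jupiter" == n) = false := beq_eq_false_iff_ne.mpr (fun e => h2 e.symm)
  have e3 : ("Saturn" == n) = false := beq_eq_false_iff_ne.mpr (fun e => h3 e.symm)
  simp [PySem.Dict.getD, PySem.Dict.get?, SPECIAL_ASPECTS, DEFAULT_ASPECTS, List.find?,
    e1, e2, e3, h1, h2, h3]

theorem offsets_bounds (n : String) :
    ∀ o ∈ PySem.Dict.getD SPECIAL_ASPECTS n DEFAULT_ASPECTS, 0 ≤ o ∧ o < 12 := by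
  rw [offsets_cases]
  split_ifs <;> (intro o ho; fin_cases ho <;> norm_num)

theorem mem_aspected (hn h : Int) (n : String) :
    (hn ∈ get_aspected_houses n h) ↔
      (1 ≤ hn ∧ hn ≤ 12) ∧
        PySem.Int.mod (hn - h) 12 ∈ PySem.Dict.getD SPECIAL_ASPECTS n DEFAULT_ASPECTS := by
  unfold get_aspected_houses
  rw [PySem.List.foldl_append_singleton_eq_map, List.nil_append]
  exact mem_map_offsets hn h _ (offsets_bounds n)

theorem fold_out_of_range (hn : Int) (l : List (String × Int)) (acc : List String)
    (hr : ¬ (1 ≤ hn ∧ hn ≤ 12)) :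
    l.foldl (fun aspecting p =>
      if hn ∈ get_aspected_houses p.1 p.2 then aspecting ++ [p.1] else aspecting) acc = acc := by
  induction l generalizing acc with
  | nil => rfl
  | cons p ps ih =>
    simp only [List.foldl_cons]
    rw [if_neg (fun hm => hr ((mem_aspected hn p.2 p.1).mp hm).1)]
    exact ih acc

theorem fold_in_range (hn : Int) (l : List (String × Int)) (acc : List String)
    (hr : 1 ≤ hn ∧ hn ≤ 12) :
    l.foldl (fun aspecting p =>
      if hn ∈ get_aspected_houses p.1 p.2 then aspecting ++ [p.1] else aspecting) acc =
      acc ++ (l.filter (fun p =>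
        decide (PySem.Int.mod (hn - p.2) 12 ∈ PySem.Dict.getD SPECIAL_ASPECTS p.1 DEFAULT_ASPECTS))).map Prod.fst := by
  induction l generalizing acc with
  | nil => simp
  | cons p ps ih =>
    simp only [List.foldl_cons, List.filter_cons]
    have hiff : (hn ∈ get_aspected_houses p.1 p.2) ↔
        PySem.Int.mod (hn - p.2) 12 ∈ PySem.Dict.getD SPECIAL_ASPECTS p.1 DEFAULT_ASPECTS := by
      rw [mem_aspected]; exact ⟨fun x => x.2, fun x => ⟨hr, x⟩⟩
    by_cases hm : PySem.Int.mod (hn - p.2) 12 ∈ PySem.Dict.getD SPECIAL_ASPECTS p.1 DEFAULT_ASPECTS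
    · have hm2 : (hn - p.2) % 12 ∈ SPECIAL_ASPECTS.getD p.1 DEFAULT_ASPECTS := by
        simpa using hm
      rw [if_pos (hiff.mpr hm)]
      simp [ih, hm2]
    · have hm2 : ¬ ((hn - p.2) % 12 ∈ SPECIAL_ASPECTS.getD p.1 DEFAULT_ASPECTS) := by
        simpa using hm
      rw [if_neg (fun x => hm (hiff.mp x))]
      simp [ih, hm2]

-- ===== VERDICT (by name: the statement is the Claim_ definition above) =====
theorem get_aspects_on_house_spec : Claim_equal_get_aspects_on_house := by
  intro hn phs _
  unfold Spec_get_aspects_on_house get_aspects_on_house get_aspects_on_house_alt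
  by_cases hr : 1 ≤ hn ∧ hn ≤ 12
  · rw [if_pos hr, fold_in_range hn phs [] hr, List.nil_append]
  · rw [if_neg hr, fold_out_of_range hn phs [] hr]
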